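-- pv_equiv track=rewrite | github.com/gregoryann/Python-Beginner-Examples | +1500 Python Challenges/V Easy/Barbecue Skewers.py | bbq_skewers
-- ===== SOURCE A (Python) =====
-- def bbq_skewers(grill):
-- 	v = 0
-- 	m = 0
-- 	for skew in grill:
-- 		if "x" in skew:
-- 			m =	m + 1
-- 		else:
-- 			v = v + 1
-- 	return [v, m]
-- ===== SOURCE B (Python) =====
-- def bbq_skewers(grill):
--     n = len(grill)
--
--     def count_x(lo, hi):
--         # divide-and-conquer count of skewers in grill[lo:hi] containing 'x'
--         if hi - lo == 0:
--             return 0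
--         if hi - lo == 1:
--             return 1 if "x" in grill[lo] else 0
--         mid = (lo + hi) // 2
--         return count_x(lo, mid) + count_x(mid, hi)
--
--     m = count_x(0, n)
--     return [n - m, m]
-- ===== Notes on version B (the rewrite author's own statement) =====
-- stated objective: alternative
-- what changed: B replaces A's single branching two-counter loop by a divide-and-conquer recursion that halves the index range, counts skewers containing 'x' in each half and derives the non-'x' count from the total length.
import Mathlib
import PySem

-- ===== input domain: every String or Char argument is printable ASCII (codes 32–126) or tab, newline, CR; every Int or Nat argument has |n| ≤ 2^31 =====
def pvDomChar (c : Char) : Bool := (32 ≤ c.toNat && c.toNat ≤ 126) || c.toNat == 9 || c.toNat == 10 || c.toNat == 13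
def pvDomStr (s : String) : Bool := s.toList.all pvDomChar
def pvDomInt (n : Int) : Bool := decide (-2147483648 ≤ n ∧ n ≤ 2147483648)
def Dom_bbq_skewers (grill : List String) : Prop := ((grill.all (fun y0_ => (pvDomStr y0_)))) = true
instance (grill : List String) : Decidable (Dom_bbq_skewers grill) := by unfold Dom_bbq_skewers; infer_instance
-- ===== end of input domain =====

-- B re-implements bbq_skewers by divide-and-conquer over index ranges instead of A's two-counter loop (objective: alternative decomposition, same cost).

-- ===== PORT A =====
-- port of A: one pass with two counters v (no 'x') and m (contains 'x')
def bbq_skewers (grill : List String) : List Int :=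
  let vm := grill.foldl (fun (vm : Int × Int) skew =>
    if PySem.Str.isIn "x" skew then (vm.1, vm.2 + 1) else (vm.1 + 1, vm.2)) (0, 0)
  [vm.1, vm.2]

-- ===== PORT B =====
-- port of B: divide-and-conquer count of 'x'-skewers over index ranges (fuel = hi - lo makes the halving recursion structural); non-'x' count from length
def bbqCountX (grill : List String) (fuel lo hi : Nat) : Nat :=
  match fuel with
  | 0 => 0
  | fuel + 1 =>
    if hi - lo = 0 then 0
    else if hi - lo = 1 then (if PySem.Str.isIn "x" (grill.getD lo "") then 1 else 0)
    else
      let mid := (lo + hi) / 2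
      bbqCountX grill fuel lo mid + bbqCountX grill fuel mid hi

def bbq_skewers_alt (grill : List String) : List Int :=
  let n := grill.length
  let m := bbqCountX grill n 0 n
  [(n : Int) - m, (m : Int)]

-- ===== PRECONDITION & SPEC =====
def Spec_bbq_skewers (grill : List String) (out : List Int) : Prop := out = bbq_skewers_alt grill
instance (grill : List String) (out : List Int) : Decidable (Spec_bbq_skewers grill out) := by unfold Spec_bbq_skewers; infer_instance

-- ===== CLAIM (what is proved, stated in full; the proofs are below) =====
def Claim_equal_bbq_skewers : Prop := ∀ (grill : List String), Dom_bbq_skewers grill → Spec_bbq_skewers grill (bbq_skewers grill)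

-- ===== LEMMAS AND PROOFS =====

-- ===== VERDICT (by name: the statement is the Claim_ definition above) =====
theorem bbqCountX_eq (grill : List String) (fuel lo hi : Nat)
    (hf : hi - lo ≤ fuel) (h : hi ≤ grill.length) :
    bbqCountX grill fuel lo hi
      = ((grill.drop lo).take (hi - lo)).countP (fun s => PySem.Str.isIn "x" s) := by
  induction fuel generalizing lo hi with
  | zero =>
    have h0 : hi - lo = 0 := by omega
    simp [bbqCountX, h0]
  | succ fuel ih =>
    by_cases h0 : hi - lo = 0
    · simp [bbqCountX, h0]
    · by_cases h1 : hi - lo = 1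
      · have hlo : lo < grill.length := by omega
        have hseg : (grill.drop lo).take (hi - lo) = [grill.getD lo ""] := by
          rw [h1, List.drop_eq_getElem_cons hlo, List.take_succ_cons, List.take_zero,
            List.getD_eq_getElem grill "" hlo]
        rw [bbqCountX, if_neg h0, if_pos h1, hseg, List.countP_singleton]
      · rw [bbqCountX, if_neg h0, if_neg h1]
        show bbqCountX grill fuel lo ((lo+hi)/2) + bbqCountX grill fuel ((lo+hi)/2) hi = _
        rw [ih lo ((lo+hi)/2) (by omega) (by omega),
          ih ((lo+hi)/2) hi (by omega) h]
        have hsplit : (grill.drop lo).take (hi - lo)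
            = (grill.drop lo).take ((lo+hi)/2 - lo)
              ++ ((grill.drop lo).drop ((lo+hi)/2 - lo)).take (hi - (lo+hi)/2) := by
          have e : hi - lo = ((lo+hi)/2 - lo) + (hi - (lo+hi)/2) := by omega
          rw [e, List.take_add]
        rw [hsplit, List.countP_append, List.drop_drop]
        have e2 : lo + ((lo+hi)/2 - lo) = (lo+hi)/2 := by omega
        rw [e2]

theorem bbq_foldl_inv (grill : List String) (v m : Int) :
    grill.foldl (fun (vm : Int × Int) skew =>
      if PySem.Str.isIn "x" skew then (vm.1, vm.2 + 1) else (vm.1 + 1, vm.2)) (v, m)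
    = (v + ((grill.length : Int) - (grill.countP (fun s => PySem.Str.isIn "x" s) : Nat)),
       m + (grill.countP (fun s => PySem.Str.isIn "x" s) : Nat)) := by
  induction grill generalizing v m with
  | nil => simp
  | cons hd tl ih =>
    rw [List.foldl_cons, List.countP_cons, List.length_cons]
    by_cases h : PySem.Str.isIn "x" hd
    · rw [if_pos h, if_pos h, ih]
      refine Prod.ext ?_ ?_ <;> push_cast <;> ring
    · rw [if_neg h, if_neg h, ih]
      refine Prod.ext ?_ ?_ <;> push_cast <;> ring

theorem bbq_skewers_spec : Claim_equal_bbq_skewers := by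
  intro grill _
  have hBc : bbqCountX grill grill.length 0 grill.length
      = grill.countP (fun s => PySem.Str.isIn "x" s) := by
    have h := bbqCountX_eq grill grill.length 0 grill.length (by omega) le_rfl
    simpa using h
  unfold Spec_bbq_skewers
  simp only [bbq_skewers, bbq_skewers_alt]
  rw [bbq_foldl_inv, hBc]
  simp
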